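-- pv_equiv track=rewrite | github.com/ashishk1331/advent-of-code-2015 | Day 1/not_quite_lisp.py | part_two
-- ===== SOURCE A (Python) =====
-- def part_two(text):
-- 	floor = 0
-- 	for ind, char in enumerate(text):
-- 		if char == '(':
-- 			floor += 1
-- 		else:
-- 			floor -= 1
--
-- 		if floor == -1:
-- 			return ind + 1
-- 	return floor
-- ===== SOURCE B (Python) =====
-- def part_two(text):
--     # Build the full running-floor table, then search it for the first -1.
--     floors = []
--     total = 0
--     for ch in text:
--         total += 1 if ch == '(' else -1
--         floors.append(total)
--     for i, f in enumerate(floors):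
--         if f == -1:
--             return i + 1
--     return floors[-1] if floors else 0
-- ===== Notes on version B (the rewrite author's own statement) =====
-- stated objective: alternative
-- what changed: Replaces the single fused loop (running floor with early return) by a build-table-then-scan decomposition: first materialise the whole prefix-sum list of floors, then a separate pass finds the first -1 (returning its index+1), falling back to the last prefix sum (or 0 for empty input).
import Mathlib
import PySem

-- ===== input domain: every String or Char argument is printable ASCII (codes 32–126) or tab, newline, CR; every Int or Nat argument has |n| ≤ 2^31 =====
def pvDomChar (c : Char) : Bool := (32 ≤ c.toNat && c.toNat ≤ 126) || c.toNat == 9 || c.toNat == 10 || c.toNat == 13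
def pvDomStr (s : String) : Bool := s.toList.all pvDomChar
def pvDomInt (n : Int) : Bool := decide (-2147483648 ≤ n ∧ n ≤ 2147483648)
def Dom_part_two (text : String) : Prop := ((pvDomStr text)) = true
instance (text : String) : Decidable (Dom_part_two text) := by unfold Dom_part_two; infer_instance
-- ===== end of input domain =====

-- B changes the decomposition only: A's fused loop becomes build-prefix-sum-table then scan.

-- ===== PORT A =====
-- A's single loop: running floor, early return of ind+1 when floor hits -1, else final floor.
def partTwoLoop : List Char → Int → Int → Int
  | [], floor, _ => floor
  | c :: rest, floor, ind =>
    let f := if c = '(' then floor + 1 else floor - 1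
    if f = -1 then ind + 1 else partTwoLoop rest f (ind + 1)

def part_two (text : String) : Int := partTwoLoop text.toList 0 0

-- ===== PORT B =====
-- Source B first loop: the list of running totals.
def prefixFloors : List Char → Int → List Int
  | [], _ => []
  | c :: rest, acc =>
    let t := acc + (if c = '(' then 1 else -1)
    t :: prefixFloors rest t

-- Source B second loop: first index (plus one) whose floor is -1.
def findNegOne : List Int → Int → Option Int
  | [], _ => none
  | f :: rest, i => if f = -1 then some (i + 1) else findNegOne rest (i + 1)

def part_two_alt (text : String) : Int :=
  let floors := prefixFloors text.toList 0
  match findNegOne floors 0 with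
  | some k => k
  | none => floors.getLastD 0

-- ===== PRECONDITION & SPEC =====
def Spec_part_two (text : String) (out : Int) : Prop := out = part_two_alt text
instance (text : String) (out : Int) : Decidable (Spec_part_two text out) := by unfold Spec_part_two; infer_instance

-- ===== CLAIM (what is proved, stated in full; the proofs are below) =====
def Claim_equal_part_two : Prop := ∀ (text : String), Dom_part_two text → Spec_part_two text (part_two text)

-- ===== LEMMAS AND PROOFS =====
theorem loop_eq_table_scan (l : List Char) (acc ind : Int) :
    partTwoLoop l acc ind =
      (match findNegOne (prefixFloors l acc) ind with
       | some k => k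
       | none => (prefixFloors l acc).getLastD acc) := by
  induction l generalizing acc ind with
  | nil => simp [partTwoLoop, prefixFloors, findNegOne]
  | cons c rest ih =>
    simp only [partTwoLoop, prefixFloors, findNegOne]
    by_cases h : acc + (if c = '(' then 1 else -1) = -1
    · have h' : (if c = '(' then acc + 1 else acc - 1) = -1 := by split_ifs at h ⊢ <;> omega
      simp [h, h']
    · have h' : (if c = '(' then acc + 1 else acc - 1) ≠ -1 := by split_ifs at h ⊢ <;> omega
      have he : (if c = '(' then acc + 1 else acc - 1) = acc + (if c = '(' then 1 else -1) := by
        split_ifs <;> omega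
      simp only [h, ite_false, he, ih, List.getLastD_cons]

-- ===== VERDICT (by name: the statement is the Claim_ definition above) =====
theorem part_two_spec : Claim_equal_part_two := by
  intro text _
  unfold Spec_part_two part_two part_two_alt
  exact loop_eq_table_scan text.toList 0 0
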